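-- pv_equiv track=rewrite | github.com/AngelFGC/AOC2022 | day22_re.py | getcubesize
-- ===== SOURCE A (Python) =====
-- from typing import Dict, List, Set, Tuple
--
-- def getcubesize(mapd: Dict):
--     start_y = 0
--     start_x = min(x for (x, y) in mapd if y == start_y)
--     x, y = start_x, start_y
--
--     while (x, y) in mapd and (x, start_y) in mapd and (start_x, y) in mapd:
--         x += 1
--         y += 1
--
--     return y
-- ===== SOURCE B (Python) =====
-- def getcubesize(mapd):
--     start_y = 0
--     start_x = min(x for (x, y) in mapd if y == start_y)
--     td = 0
--     while (start_x + td, start_y) in mapd: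
--         td += 1
--     ld = 0
--     while (start_x, ld) in mapd:
--         ld += 1
--     dd = 0
--     while (start_x + dd, dd) in mapd:
--         dd += 1
--     return min(td, ld, dd)
-- ===== Notes on version B (the rewrite author's own statement) =====
-- stated objective: alternative
-- what changed: Replaces the single fused diagonal walk (incrementing x and y together while three membership tests hold) by three independent run-length scans (top row, left column, diagonal) combined with min.
import Mathlib
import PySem

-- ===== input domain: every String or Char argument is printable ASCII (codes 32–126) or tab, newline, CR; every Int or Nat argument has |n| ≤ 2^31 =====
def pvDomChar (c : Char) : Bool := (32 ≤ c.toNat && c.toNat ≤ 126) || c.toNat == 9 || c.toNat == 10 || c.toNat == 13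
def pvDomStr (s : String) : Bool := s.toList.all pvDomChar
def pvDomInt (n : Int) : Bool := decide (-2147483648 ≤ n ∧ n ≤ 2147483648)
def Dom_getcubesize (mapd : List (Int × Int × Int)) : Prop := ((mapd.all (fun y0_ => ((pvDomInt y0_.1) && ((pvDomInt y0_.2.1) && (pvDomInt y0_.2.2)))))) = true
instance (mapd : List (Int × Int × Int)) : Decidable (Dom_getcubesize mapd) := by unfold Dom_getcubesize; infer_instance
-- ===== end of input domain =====

-- B computes the same cube size by three independent run-length scans (top row, left column, diagonal) plus min, instead of A's fused diagonal walk (objective: alternative decomposition, not faster).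

-- ===== PORT A =====
-- '(x, y) in mapd' on the key association list
def pvMemKey (mapd : List (Int × Int × Int)) (x y : Int) : Bool :=
  mapd.any (fun t => t.1 == x && t.2.1 == y)

-- A's while loop; fuel = mapd.length + 1 is sufficient in reality: each successful
-- iteration requires the distinct key (x, y) to be present in mapd, so at most
-- mapd.length iterations succeed (the fuel guard only makes the recursion total).
def pvLoopA (mapd : List (Int × Int × Int)) (sx : Int) : Nat → Int → Int → Int
  | 0, _, y => y
  | fuel + 1, x, y =>
    if pvMemKey mapd x y && pvMemKey mapd x 0 && pvMemKey mapd sx y then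
      pvLoopA mapd sx fuel (x + 1) (y + 1)
    else y

def getcubesize (mapd : List (Int × Int × Int)) : Int :=
  match PySem.List.min? ((mapd.filter (fun t => t.2.1 == 0)).map (fun t => t.1)) (fun v => v) with
  | none => 0   -- dead under Pre_: Python's min raises ValueError on the empty generator
  | some sx => pvLoopA mapd sx (mapd.length + 1) sx 0

-- ===== PORT B =====
-- one of B's independent while loops: smallest k ≥ start with ¬ p k (fuel-bounded; same sufficiency argument as above)
def pvScan (p : Int → Bool) : Nat → Int → Int
  | 0, k => k
  | fuel + 1, k => if p k then pvScan p fuel (k + 1) else k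

def getcubesize_alt (mapd : List (Int × Int × Int)) : Int :=
  match PySem.List.min? ((mapd.filter (fun t => t.2.1 == 0)).map (fun t => t.1)) (fun v => v) with
  | none => 0   -- dead under Pre_
  | some sx =>
    let td := pvScan (fun k => pvMemKey mapd (sx + k) 0) (mapd.length + 1) 0
    let ld := pvScan (fun k => pvMemKey mapd sx k) (mapd.length + 1) 0
    let dd := pvScan (fun k => pvMemKey mapd (sx + k) k) (mapd.length + 1) 0
    min td (min ld dd)

-- ===== PRECONDITION & SPEC =====
-- Pre_ excludes exactly the inputs with no key on row y = 0, where A's min(...) raises ValueError.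
def Pre_getcubesize (mapd : List (Int × Int × Int)) : Prop :=
  (mapd.any (fun t => t.2.1 == 0)) = true
instance (mapd : List (Int × Int × Int)) : Decidable (Pre_getcubesize mapd) := by
  unfold Pre_getcubesize; infer_instance

def pvWitness_getcubesize : (List (Int × Int × Int)) := [(1, 0, 0), (2, 0, 0), (1, 1, 0)]

def Spec_getcubesize (mapd : List (Int × Int × Int)) (out : Int) : Prop := out = getcubesize_alt mapd
instance (mapd : List (Int × Int × Int)) (out : Int) : Decidable (Spec_getcubesize mapd out) := by unfold Spec_getcubesize; infer_instance

-- ===== CLAIM (what is proved, stated in full; the proofs are below) =====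
def Claim_equal_getcubesize : Prop := ∀ (mapd : List (Int × Int × Int)), Dom_getcubesize mapd → Pre_getcubesize mapd → Spec_getcubesize mapd (getcubesize mapd)

-- ===== LEMMAS AND PROOFS =====

theorem pvScan_ge (p : Int → Bool) : ∀ (fuel : Nat) (k : Int), k ≤ pvScan p fuel k := by
  intro fuel
  induction fuel with
  | zero => intro k; simp [pvScan]
  | succ n ih =>
    intro k
    simp only [pvScan]
    split
    · have := ih (k + 1); omega
    · omega

-- A's fused walk, with x pinned to sx + k, is the scan of the conjunction of the three tests
theorem pvLoopA_eq_scan (mapd : List (Int × Int × Int)) (sx : Int) :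
    ∀ (fuel : Nat) (k : Int),
      pvLoopA mapd sx fuel (sx + k) k =
        pvScan (fun j => pvMemKey mapd (sx + j) j && pvMemKey mapd (sx + j) 0 && pvMemKey mapd sx j) fuel k := by
  intro fuel
  induction fuel with
  | zero => intro k; simp [pvLoopA, pvScan]
  | succ n ih =>
    intro k
    simp only [pvLoopA, pvScan]
    split
    · have h := ih (k + 1)
      rw [show sx + k + 1 = sx + (k + 1) by ring]
      exact h
    · rfl

-- the scan of a conjunction is the min of the three scans
theorem pvScan_and_min (p q r : Int → Bool) :
    ∀ (fuel : Nat) (k : Int),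
      pvScan (fun j => p j && q j && r j) fuel k =
        min (pvScan q fuel k) (min (pvScan r fuel k) (pvScan p fuel k)) := by
  intro fuel
  induction fuel with
  | zero => intro k; simp [pvScan]
  | succ n ih =>
    intro k
    simp only [pvScan]
    rcases Bool.eq_false_or_eq_true (p k) with hp | hp <;>
      rcases Bool.eq_false_or_eq_true (q k) with hq | hq <;>
      rcases Bool.eq_false_or_eq_true (r k) with hr | hr <;>
      simp only [hp, hq, hr, Bool.and_false, Bool.and_true] <;>
      first
        | exact ih (k + 1)
        | · have h1 := pvScan_ge q n (k + 1)
            have h2 := pvScan_ge r n (k + 1)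
            have h3 := pvScan_ge p n (k + 1)
            simp
            all_goals omega

-- ===== VERDICT (by name: the statement is the Claim_ definition above) =====
theorem getcubesize_spec : Claim_equal_getcubesize := by
  intro mapd _ _
  unfold Spec_getcubesize getcubesize getcubesize_alt
  cases h : PySem.List.min? ((mapd.filter (fun t => t.2.1 == 0)).map (fun t => t.1)) (fun v => v) with
  | none => rfl
  | some sx =>
    simp only []
    have h0 := pvLoopA_eq_scan mapd sx (mapd.length + 1) 0
    rw [show sx + (0:Int) = sx by ring] at h0
    rw [h0, pvScan_and_min
      (fun j => pvMemKey mapd (sx + j) j)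
      (fun j => pvMemKey mapd (sx + j) 0)
      (fun j => pvMemKey mapd sx j)]
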